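-- pv_equiv track=rewrite | github.com/MrHughesComputing/dream-trance-midi-generator | app.py | chord_tones_in_range
-- ===== SOURCE A (Python) =====
-- def chord_tones_in_range(chord, low: int, high: int):
--     tones = []
--     for octave_shift in range(-2, 4):
--         for base_note in chord["notes"]:
--             n = base_note + octave_shift * 12
--             if low <= n <= high:
--                 tones.append(n)
--     return sorted(set(tones))
-- ===== SOURCE B (Python) =====
-- def chord_tones_in_range(chord, low: int, high: int):
--     tones = set()
--     for base in chord["notes"]:
--         s_min = max(-2, -((base - low) // 12))
--         s_max = min(3, (high - base) // 12)
--         for s in range(s_min, s_max + 1):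
--             tones.add(base + 12 * s)
--     return sorted(tones)
-- ===== Notes on version B (the rewrite author's own statement) =====
-- stated objective: alternative
-- what changed: B computes, for each base note, the exact interval of qualifying octave shifts by integer floor/ceil division and adds only those tones to a set, instead of scanning all six octave shifts and filtering each candidate against the range.
import Mathlib
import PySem

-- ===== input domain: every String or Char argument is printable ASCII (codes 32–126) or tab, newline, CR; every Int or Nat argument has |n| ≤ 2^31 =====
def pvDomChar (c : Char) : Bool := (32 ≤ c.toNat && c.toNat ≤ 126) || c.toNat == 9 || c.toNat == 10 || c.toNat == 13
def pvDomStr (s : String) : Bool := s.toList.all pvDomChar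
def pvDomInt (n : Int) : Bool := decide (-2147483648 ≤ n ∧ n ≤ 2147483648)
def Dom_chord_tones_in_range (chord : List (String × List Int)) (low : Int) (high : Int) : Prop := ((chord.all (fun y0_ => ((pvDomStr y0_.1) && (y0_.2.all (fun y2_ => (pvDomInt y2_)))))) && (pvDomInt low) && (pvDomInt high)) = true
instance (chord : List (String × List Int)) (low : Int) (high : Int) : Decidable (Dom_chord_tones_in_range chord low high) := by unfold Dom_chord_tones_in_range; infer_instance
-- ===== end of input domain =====

-- B computes each base note's qualifying octave-shift interval by integer floor/ceil division
-- instead of scanning all six octave shifts and filtering (alternative decomposition, same cost class).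


-- ===== PORT A =====
-- chord["notes"]: first-match lookup; KeyError (missing key) is excluded by Pre_.
def chord_tones_in_range (chord : List (String × List Int)) (low : Int) (high : Int) : List Int :=
  let notes := (PySem.Dict.mk chord).getD "notes" []
  let tones := (PySem.List.pyRange (-2) 4 1).foldl (fun acc octave_shift =>
    notes.foldl (fun acc base_note =>
      let n := base_note + octave_shift * 12
      if low ≤ n ∧ n ≤ high then acc ++ [n] else acc) acc) []
  PySem.List.sorted (PySem.Set.ofList tones) (fun x => x) false

-- ===== PORT B =====
def chord_tones_in_range_alt (chord : List (String × List Int)) (low : Int) (high : Int) : List Int :=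
  let notes := (PySem.Dict.mk chord).getD "notes" []
  let tones := notes.foldl (fun st base =>
    let sMin := max (-2) (-(PySem.Int.floordiv (base - low) 12))
    let sMax := min 3 (PySem.Int.floordiv (high - base) 12)
    (PySem.List.pyRange sMin (sMax + 1) 1).foldl (fun st s => PySem.Set.add st (base + 12 * s)) st)
    PySem.Set.empty
  PySem.List.sorted tones (fun x => x) false

-- ===== PRECONDITION & SPEC =====
-- Pre_ excludes only the inputs where A raises KeyError: no "notes" key in the dict.
def Pre_chord_tones_in_range (chord : List (String × List Int)) (low : Int) (high : Int) : Prop :=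
  "notes" ∈ chord.map Prod.fst
instance (chord : List (String × List Int)) (low : Int) (high : Int) : Decidable (Pre_chord_tones_in_range chord low high) := by unfold Pre_chord_tones_in_range; infer_instance
def pvWitness_chord_tones_in_range : (List (String × List Int)) × Int × Int := ([("notes", [60, 64, 67])], 50, 80)

def Spec_chord_tones_in_range (chord : List (String × List Int)) (low : Int) (high : Int) (out : List Int) : Prop := out = chord_tones_in_range_alt chord low high
instance (chord : List (String × List Int)) (low : Int) (high : Int) (out : List Int) : Decidable (Spec_chord_tones_in_range chord low high out) := by unfold Spec_chord_tones_in_range; infer_instance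

-- ===== CLAIM (what is proved, stated in full; the proofs are below) =====
def Claim_equal_chord_tones_in_range : Prop := ∀ (chord : List (String × List Int)) (low : Int) (high : Int), Dom_chord_tones_in_range chord low high → Pre_chord_tones_in_range chord low high → Spec_chord_tones_in_range chord low high (chord_tones_in_range chord low high)

-- ===== LEMMAS AND PROOFS =====

-- membership in A's inner append-if loop
theorem mem_foldl_append_if {α β : Type} [DecidableEq β] (l : List α) (acc : List β)
    (p : α → Prop) [DecidablePred p] (f : α → β) (x : β) :
    (x ∈ l.foldl (fun acc a => if p a then acc ++ [f a] else acc) acc) ↔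
      x ∈ acc ∨ ∃ a ∈ l, p a ∧ x = f a := by
  induction l generalizing acc with
  | nil => simp
  | cons h t ih =>
    simp only [List.foldl_cons, ih]
    by_cases hp : p h <;> simp [hp] <;> tauto

-- membership in B's Set.add loop
theorem mem_foldl_set_add {α β : Type} [BEq β] [LawfulBEq β] (l : List α) (st : PySem.Set β)
    (f : α → β) (x : β) :
    (x ∈ l.foldl (fun st a => PySem.Set.add st (f a)) st) ↔ x ∈ st ∨ ∃ a ∈ l, x = f a := by
  induction l generalizing st with
  | nil => simp
  | cons h t ih =>
    simp only [List.foldl_cons, ih, PySem.Set.mem_add, List.mem_cons, exists_eq_or_imp]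
    tauto

theorem nodup_foldl_set_add {α β : Type} [BEq β] [LawfulBEq β] (l : List α) (st : PySem.Set β)
    (f : α → β) (h : st.Nodup) :
    (l.foldl (fun st a => PySem.Set.add st (f a)) st).Nodup := by
  induction l generalizing st with
  | nil => exact h
  | cons a t ih => exact ih _ (PySem.Set.nodup_add _ _ h)

-- the shift-interval arithmetic: s qualifies in A iff s lies in B's computed interval
theorem shift_iff (base low high s : Int) :
    (-2 ≤ s ∧ s < 4 ∧ low ≤ base + s * 12 ∧ base + s * 12 ≤ high) ↔
      (max (-2) (-(PySem.Int.floordiv (base - low) 12)) ≤ s ∧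
        s < min 3 (PySem.Int.floordiv (high - base) 12) + 1) := by
  have h1 : -s ≤ PySem.Int.floordiv (base - low) 12 ↔ (-s) * 12 ≤ base - low :=
    PySem.Int.le_floordiv_iff_mul_le (by norm_num)
  have h2 : s ≤ PySem.Int.floordiv (high - base) 12 ↔ s * 12 ≤ high - base :=
    PySem.Int.le_floordiv_iff_mul_le (by norm_num)
  omega

theorem chord_tones_mem_iff (chord : List (String × List Int)) (low high x : Int) :
    x ∈ PySem.Set.ofList ((PySem.List.pyRange (-2) 4 1).foldl (fun acc octave_shift =>
        ((PySem.Dict.mk chord).getD "notes" []).foldl (fun acc base_note =>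
          let n := base_note + octave_shift * 12
          if low ≤ n ∧ n ≤ high then acc ++ [n] else acc) acc) []) ↔
      x ∈ ((PySem.Dict.mk chord).getD "notes" []).foldl (fun st base =>
        (PySem.List.pyRange (max (-2) (-(PySem.Int.floordiv (base - low) 12)))
            (min 3 (PySem.Int.floordiv (high - base) 12) + 1) 1).foldl
          (fun st s => PySem.Set.add st (base + 12 * s)) st) PySem.Set.empty := by
  set notes := (PySem.Dict.mk chord).getD "notes" [] with hn
  rw [PySem.Set.mem_ofList]
  -- A side: flatten the two nested loops
  have hA : ∀ (R : List Int) (acc : List Int),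
      (x ∈ R.foldl (fun acc octave_shift =>
        notes.foldl (fun acc base_note =>
          let n := base_note + octave_shift * 12
          if low ≤ n ∧ n ≤ high then acc ++ [n] else acc) acc) acc) ↔
        x ∈ acc ∨ ∃ s ∈ R, ∃ b ∈ notes, (low ≤ b + s * 12 ∧ b + s * 12 ≤ high) ∧ x = b + s * 12 := by
    intro R
    induction R with
    | nil => simp
    | cons s t ih =>
      intro acc
      simp only [List.foldl_cons, ih,
        mem_foldl_append_if notes acc (fun b => low ≤ b + s * 12 ∧ b + s * 12 ≤ high)
          (fun b => b + s * 12)]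
      constructor
      · rintro ((h | ⟨b, hb, hc, hx⟩) | h)
        · exact Or.inl h
        · exact Or.inr ⟨s, by simp, b, hb, hc, hx⟩
        · rcases h with ⟨s', hs', rest⟩; exact Or.inr ⟨s', by simp [hs'], rest⟩
      · rintro (h | ⟨s', hs', b, hb, hc, hx⟩)
        · exact Or.inl (Or.inl h)
        · rcases List.mem_cons.mp hs' with h | h
          · subst h; exact Or.inl (Or.inr ⟨b, hb, hc, hx⟩)
          · exact Or.inr ⟨s', h, b, hb, hc, hx⟩
  -- B side
  have hB : ∀ (N : List Int) (st : PySem.Set Int),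
      (x ∈ N.foldl (fun st base =>
        (PySem.List.pyRange (max (-2) (-(PySem.Int.floordiv (base - low) 12)))
            (min 3 (PySem.Int.floordiv (high - base) 12) + 1) 1).foldl
          (fun st s => PySem.Set.add st (base + 12 * s)) st) st) ↔
        x ∈ st ∨ ∃ b ∈ N, ∃ s, (max (-2) (-(PySem.Int.floordiv (b - low) 12)) ≤ s ∧
          s < min 3 (PySem.Int.floordiv (high - b) 12) + 1) ∧ x = b + 12 * s := by
    intro N
    induction N with
    | nil => simp
    | cons b t ih =>
      intro st
      simp only [List.foldl_cons, ih, mem_foldl_set_add]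
      constructor
      · rintro (((h | ⟨s, hs, hx⟩) | h))
        · exact Or.inl h
        · exact Or.inr ⟨b, by simp, s, PySem.List.mem_pyRange_one.mp hs, hx⟩
        · rcases h with ⟨b', hb', rest⟩; exact Or.inr ⟨b', by simp [hb'], rest⟩
      · rintro (h | ⟨b', hb', s, hs, hx⟩)
        · exact Or.inl (Or.inl h)
        · rcases List.mem_cons.mp hb' with h | h
          · subst h; exact Or.inl (Or.inr ⟨s, PySem.List.mem_pyRange_one.mpr hs, hx⟩)
          · exact Or.inr ⟨b', h, s, hs, hx⟩
  rw [hA, hB]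
  constructor
  · rintro (h | ⟨s, hs, b, hb, hc, hx⟩)
    · exact absurd h (List.not_mem_nil)
    · have hs' := PySem.List.mem_pyRange_one.mp hs
      exact Or.inr ⟨b, hb, s, (shift_iff b low high s).mp ⟨by omega, by omega, hc.1, hc.2⟩, by omega⟩
  · rintro (h | ⟨b, hb, s, hs, hx⟩)
    · exact absurd h (by simp [PySem.Set.empty])
    · have h2 := (shift_iff b low high s).mpr hs
      exact Or.inr ⟨s, PySem.List.mem_pyRange_one.mpr ⟨by omega, by omega⟩, b, hb, ⟨h2.2.2.1, h2.2.2.2⟩, by omega⟩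

theorem nodup_foldl_body_preserve {α β : Type} (l : List α) (g : List β → α → List β)
    (hg : ∀ st a, st.Nodup → (g st a).Nodup) :
    ∀ st : List β, st.Nodup → (l.foldl g st).Nodup := by
  induction l with
  | nil => exact fun st h => h
  | cons a t ih => exact fun st h => ih _ (hg st a h)

-- ===== VERDICT (by name: the statement is the Claim_ definition above) =====
theorem chord_tones_in_range_spec : Claim_equal_chord_tones_in_range := by
  intro chord low high _ _
  unfold Spec_chord_tones_in_range chord_tones_in_range chord_tones_in_range_alt
  apply PySem.List.sorted_eq_sorted_of_perm _ _ _ (fun a b h => h)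
  refine (List.perm_ext_iff_of_nodup (PySem.Set.nodup_ofList _) ?_).mpr
    (fun x => chord_tones_mem_iff chord low high x)
  refine nodup_foldl_body_preserve _ _ ?_ _ (by simp [PySem.Set.empty])
  intro st b h
  exact nodup_foldl_set_add _ _ _ h
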